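-- pv_equiv track=rewrite | github.com/danielkeller/budge_it | budget/algorithms.py | double_entrify_by
-- ===== SOURCE A (Python) =====
-- from typing import TypeVar, Iterable,  Generic
-- from collections import defaultdict, deque
--
-- T = TypeVar('T')
--
-- def sum_by_with_zeros(input: Iterable[tuple[T, int]]) -> defaultdict[T, int]:
--     result: defaultdict[T, int] = defaultdict(int)
--     for key, value in input:
--         result[key] += value
--     return result
--
-- def sum_by(input: Iterable[tuple[T, int]]) -> defaultdict[T, int]:
--     result = sum_by_with_zeros(input)
--     for key in list(result.keys()):
--         if not result[key]:
--             del result[key]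
--     return result
--
-- def double_entrify_by(amounts: dict[T, int], tree: dict[T, T]):
--     degree = sum_by((parent, 1) for parent in tree.values())
--     leaves = deque(tree.keys() - degree.keys())
--     result: dict[tuple[T, T], int] = {}
--     while leaves:
--         source = leaves.popleft()
--         if source not in tree:
--             continue
--         sink = tree[source]
--         degree[sink] -= 1
--         if not degree[sink]:
--             leaves.append(sink)
--         result[(source, sink)] = -amounts[source]
--         amounts[sink] += amounts[source]
--         amounts[source] = 0
--     return result
-- ===== SOURCE B (Python) =====
-- # Level-synchronized leaf peeling: invert the tree into a children index once and
-- # peel whole frontiers using a processed-set readiness test, instead of A's deque +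
-- # in-degree counter bookkeeping.  Same return value and same final `amounts` mutation.
-- def double_entrify_by(amounts, tree):
--     children = {}
--     for child, parent in tree.items():
--         children.setdefault(parent, []).append(child)
--     done = set()
--     result = {}
--     frontier = [c for c in tree if c not in children]
--     while frontier:
--         done.update(frontier)
--         processed = [c for c in frontier if c in tree]
--         for source in processed:
--             sink = tree[source]
--             result[(source, sink)] = -amounts[source]
--             amounts[sink] += amounts[source]
--             amounts[source] = 0
--         sinks = [tree[c] for c in processed]
--         frontier = [p for i, p in enumerate(sinks)
--                     if p not in sinks[i + 1:]
--                     and all(d in done for d in children[p])]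
--     return result
-- ===== Notes on version B (the rewrite author's own statement) =====
-- stated objective: alternative
-- what changed: Replaces A's Kahn-style deque with in-degree counters by an inverted parent->children index, level-synchronized frontier peeling with a processed-set readiness test (all children done), and a keep-last-occurrence comprehension for the next frontier; the FIFO queue and the degree dict disappear.
import Mathlib
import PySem

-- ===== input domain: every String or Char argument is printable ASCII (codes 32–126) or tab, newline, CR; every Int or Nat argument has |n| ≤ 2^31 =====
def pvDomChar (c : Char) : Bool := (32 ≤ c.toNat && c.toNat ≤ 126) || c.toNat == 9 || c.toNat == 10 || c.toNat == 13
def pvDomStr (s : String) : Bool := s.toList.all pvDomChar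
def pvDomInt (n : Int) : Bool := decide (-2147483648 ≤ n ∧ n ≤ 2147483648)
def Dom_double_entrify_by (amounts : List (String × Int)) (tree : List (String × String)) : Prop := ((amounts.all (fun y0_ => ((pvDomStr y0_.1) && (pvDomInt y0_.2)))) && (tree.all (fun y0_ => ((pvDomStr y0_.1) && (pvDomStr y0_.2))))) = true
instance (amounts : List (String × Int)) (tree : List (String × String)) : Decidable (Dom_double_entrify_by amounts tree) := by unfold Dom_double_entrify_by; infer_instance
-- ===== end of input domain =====

-- B replaces A's deque-plus-in-degree-counter peeling by an inverted children index with
-- level-synchronized frontiers and a processed-set readiness test (objective: alternative).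
-- A mutates its `amounts` argument in place; the equivalence proved here is about the RETURN
-- value only (the Python B performs the same final mutation of `amounts`).

-- ===== PORT A =====
-- sum_by_with_zeros: defaultdict(int) accumulation (result[key] += value)
def pvSumByWithZeros (l : List (String × Int)) : PySem.Dict String Int :=
  l.foldl (fun d kv => d.modify kv.1 0 (· + kv.2)) PySem.Dict.empty

-- sum_by: the zero-deleting pass over list(result.keys())
def pvSumBy (l : List (String × Int)) : PySem.Dict String Int :=
  let r := pvSumByWithZeros l
  r.keys.foldl (fun d k => if d.getD k 0 = 0 then d.erase k else d) r

-- the while-loop of A; fuel is only a totality guard (2*len(tree)+1 exceeds the number of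
-- deque pops, which is bounded by #initial leaves + #distinct parents ≤ 2*len(tree)).
-- amounts[source] / amounts[sink] are read with getD 0: exact whenever the key is present,
-- i.e. on every input admitted by Pre_ (Python raises KeyError exactly where Pre_ excludes).
def pvLoopA (tree : PySem.Dict String String) :
    Nat → List String → PySem.Dict String Int → PySem.Dict String Int →
    PySem.Dict (String × String) Int → PySem.Dict (String × String) Int
  | 0, _, _, _, res => res
  | _ + 1, [], _, _, res => res
  | fuel + 1, s :: q, deg, am, res =>
    match tree.get? s with
    | none => pvLoopA tree fuel q deg am res   -- if source not in tree: continue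
    | some sink =>
      let deg' := deg.modify sink 0 (· - 1)                       -- degree[sink] -= 1
      let q' := if deg'.getD sink 0 = 0 then q ++ [sink] else q   -- if not degree[sink]: leaves.append(sink)
      let av := am.getD s 0
      let res' := res.insert (s, sink) (-av)                      -- result[(source, sink)] = -amounts[source]
      let am' := (am.modify sink 0 (· + av)).insert s 0           -- amounts[sink] += amounts[source]; amounts[source] = 0
      pvLoopA tree fuel q' deg' am' res'

-- Python's `deque(tree.keys() - degree.keys())` iterates a set in unmodelled hash order; the
-- first-occurrence key order is chosen here (the returned dict is compared ignoring order).
def double_entrify_by (amounts : List (String × Int)) (tree : List (String × String)) : List (String × String × Int) :=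
  let amountsD := PySem.Dict.ofList amounts
  let treeD := PySem.Dict.ofList tree
  let degree := pvSumBy (treeD.values.map (fun p => (p, (1 : Int))))
  let leaves := treeD.keys.filter (fun k => !degree.contains k)
  (pvLoopA treeD (2 * tree.length + 1) leaves degree amountsD PySem.Dict.empty).items.map
    (fun x => (x.1.1, x.1.2, x.2))

-- ===== PORT B =====
-- children.setdefault(parent, []).append(child)
def pvChildren (tree : PySem.Dict String String) : PySem.Dict String (List String) :=
  tree.items.foldl (fun d cp => d.modify cp.2 [] (· ++ [cp.1])) PySem.Dict.empty

-- the while-loop of Source B; fuel is only a totality guard (each round consumes at least one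
-- fresh node, and there are at most 2*len(tree) of them).  `sinks[i+1:]` is ported as
-- drop (i.toNat+1): exact, since enumerate indices are ≥ 0.  tree[c] on processed c (which
-- satisfies `c in tree`) is ported as getD c ""; amounts reads as in port A.
def pvLoopB (tree : PySem.Dict String String) (children : PySem.Dict String (List String)) :
    Nat → List String → PySem.Set String → PySem.Dict String Int →
    PySem.Dict (String × String) Int → PySem.Dict (String × String) Int
  | 0, _, _, _, res => res
  | _ + 1, [], _, _, res => res
  | fuel + 1, c0 :: fr, don, am, res =>
    let frontier := c0 :: fr
    let don' := PySem.Set.update don frontier                       -- done.update(frontier)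
    let processed := frontier.filter (fun c => tree.contains c)     -- [c for c in frontier if c in tree]
    let st := processed.foldl (fun (st : PySem.Dict String Int × PySem.Dict (String × String) Int) c =>
        let sink := tree.getD c ""
        let av := st.1.getD c 0
        ((st.1.modify sink 0 (· + av)).insert c 0, st.2.insert (c, sink) (-av))) (am, res)
    let sinks := processed.map (fun c => tree.getD c "")
    let frontier' := ((PySem.List.enumerate sinks).filter (fun ip =>
        !((sinks.drop (ip.1.toNat + 1)).contains ip.2) &&
        (children.getD ip.2 []).all (fun d => don'.contains d))).map (·.2)
    pvLoopB tree children fuel frontier' don' st.1 st.2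

def double_entrify_by_alt (amounts : List (String × Int)) (tree : List (String × String)) : List (String × String × Int) :=
  let amountsD := PySem.Dict.ofList amounts
  let treeD := PySem.Dict.ofList tree
  let children := pvChildren treeD
  let frontier := treeD.keys.filter (fun c => !children.contains c)   -- [c for c in tree if c not in children]
  (pvLoopB treeD children (2 * tree.length + 1) frontier PySem.Set.empty amountsD PySem.Dict.empty).items.map
    (fun x => (x.1.1, x.1.2, x.2))

-- ===== PRECONDITION & SPEC =====
-- the ancestor chain of x in the parent map (x, parent(x), ...), at most n nodes
def pvChain (T : PySem.Dict String String) : Nat → String → List String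
  | 0, _ => []
  | n + 1, x =>
    x :: (match T.get? x with
      | none => []
      | some y => pvChain T n y)

-- d lies on a cycle of the parent map
def pvOnCycle (T : PySem.Dict String String) (d : String) : Bool :=
  ((pvChain T (T.keys.length + 2) d).drop 1).contains d

-- some node on a cycle has c among its ancestors: the loop never processes c
def pvBlocked (T : PySem.Dict String String) (c : String) : Bool :=
  T.keys.any (fun d => pvOnCycle T d && (pvChain T (T.keys.length + 2) d).contains c)

-- Pre_ is exactly the set of inputs on which A returns: A raises KeyError iff some
-- processed node (a tree key not blocked below a cycle of the parent map) or the parent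
-- it sends its amount to has no amounts entry.
def Pre_double_entrify_by (amounts : List (String × Int)) (tree : List (String × String)) : Prop :=
  ∀ cp ∈ (PySem.Dict.ofList tree).items,
    pvBlocked (PySem.Dict.ofList tree) cp.1 = false →
      (PySem.Dict.ofList amounts).contains cp.1 = true ∧
      (PySem.Dict.ofList amounts).contains cp.2 = true
instance (amounts : List (String × Int)) (tree : List (String × String)) : Decidable (Pre_double_entrify_by amounts tree) := by
  unfold Pre_double_entrify_by; infer_instance

def pvWitness_double_entrify_by : (List (String × Int)) × (List (String × String)) :=
  ([("a", 5), ("b", 7)], [("a", "b")])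

def Spec_double_entrify_by (amounts : List (String × Int)) (tree : List (String × String)) (out : List (String × String × Int)) : Prop := out = double_entrify_by_alt amounts tree
instance (amounts : List (String × Int)) (tree : List (String × String)) (out : List (String × String × Int)) : Decidable (Spec_double_entrify_by amounts tree out) := by unfold Spec_double_entrify_by; infer_instance

-- ===== CLAIM (what is proved, stated in full; the proofs are below) =====
def Claim_equal_double_entrify_by : Prop := ∀ (amounts : List (String × Int)) (tree : List (String × String)), Dom_double_entrify_by amounts tree → Pre_double_entrify_by amounts tree → Spec_double_entrify_by amounts tree (double_entrify_by amounts tree)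

-- ===== LEMMAS AND PROOFS =====

-- children of p in the inverted index
def pvChl (T : PySem.Dict String String) (p : String) : List String :=
  (pvChildren T).getD p []

-- pvChildren as a fold over swapped items
theorem pvChildren_eq (T : PySem.Dict String String) :
    pvChildren T = (T.items.map Prod.swap).foldl
      (fun d pr => d.modify pr.1 [] (· ++ [pr.2])) PySem.Dict.empty := by
  rw [List.foldl_map]; rfl

-- the children list of p: the keys of T whose value is p, in key order
theorem pvChl_eq (T : PySem.Dict String String) (p : String) :
    pvChl T p = (T.items.filter (fun cp => cp.2 == p)).map (·.1) := by
  unfold pvChl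
  rw [pvChildren_eq, PySem.Dict.getD_foldl_modify_append, PySem.Dict.getD_empty,
    List.filter_map, List.map_map]
  rfl

theorem pvChl_mem (T : PySem.Dict String String) (hT : T.keys.Nodup) (c p : String) :
    c ∈ pvChl T p ↔ T.get? c = some p := by
  rw [pvChl_eq, PySem.Dict.get?_eq_some_iff_mem_items _ _ _ hT]
  simp only [List.mem_map, List.mem_filter, beq_iff_eq]
  constructor
  · rintro ⟨⟨c', p'⟩, ⟨hmem, hp⟩, rfl⟩; simp only at hp; subst hp; exact hmem
  · intro h; exact ⟨(c, p), ⟨h, rfl⟩, rfl⟩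

theorem pvChl_nodup (T : PySem.Dict String String) (hT : T.keys.Nodup) (p : String) :
    (pvChl T p).Nodup := by
  rw [pvChl_eq]
  have hsub : ((T.items.filter (fun cp => cp.2 == p)).map (·.1)).Sublist (T.items.map (·.1)) :=
    List.Sublist.map _ List.filter_sublist
  exact hT.sublist hsub

theorem pvChl_length (T : PySem.Dict String String) (p : String) :
    (pvChl T p).length = T.values.count p := by
  rw [pvChl_eq, List.length_map, List.count_eq_countP, PySem.Dict.values, List.countP_map,
    ← List.countP_eq_length_filter]
  rfl

theorem pvChildren_keys (T : PySem.Dict String String) :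
    (pvChildren T).keys = PySem.Set.ofList T.values := by
  have h := PySem.Dict.keys_foldl_modify_key (l := T.items) (key := fun cp => cp.2)
    (d0 := ([] : List String)) (f := fun _ cp => (· ++ [cp.1])) (d := PySem.Dict.empty)
  simpa [PySem.Dict.keys_empty, PySem.Dict.values] using h

theorem pvSumByWithZeros_counter (l : List String) :
    pvSumByWithZeros (l.map (fun p => (p, (1 : Int)))) = PySem.Dict.counter l := by
  unfold pvSumByWithZeros
  rw [List.foldl_map, PySem.Dict.counter_eq_foldl]

theorem pvEraseFold_id (l : List String) (d : PySem.Dict String Int)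
    (h : ∀ k ∈ l, d.getD k 0 ≠ 0) :
    l.foldl (fun d k => if d.getD k 0 = 0 then d.erase k else d) d = d := by
  induction l with
  | nil => rfl
  | cons k l ih =>
    simp only [List.foldl_cons, if_neg (h k (List.mem_cons_self ..))]
    exact ih (fun k' hk' => h k' (List.mem_cons_of_mem _ hk'))

theorem pvDegree_eq (T : PySem.Dict String String) :
    pvSumBy (T.values.map (fun p => (p, (1 : Int)))) = PySem.Dict.counter T.values := by
  unfold pvSumBy
  rw [pvSumByWithZeros_counter]
  apply pvEraseFold_id
  intro k hk
  rw [PySem.Dict.getD_counter]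
  rw [PySem.Dict.keys_counter, PySem.Set.mem_ofList] at hk
  have := List.count_pos_iff.mpr hk
  omega

-- A's processing of one frontier F: final (deg, amounts, result) plus the queue appends
def pvProcF (T : PySem.Dict String String) :
    List String →
    PySem.Dict String Int × PySem.Dict String Int × PySem.Dict (String × String) Int →
    (PySem.Dict String Int × PySem.Dict String Int × PySem.Dict (String × String) Int) × List String
  | [], st => (st, [])
  | c :: F, st =>
    match T.get? c with
    | none => pvProcF T F st
    | some sink =>
      let deg' := st.1.modify sink 0 (· - 1)
      let av := st.2.1.getD c 0
      let res' := st.2.2.insert (c, sink) (-av)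
      let am' := (st.2.1.modify sink 0 (· + av)).insert c 0
      let r := pvProcF T F (deg', am', res')
      (r.1, (if deg'.getD sink 0 = 0 then [sink] else []) ++ r.2)

-- recursive form of B's next-frontier comprehension (keep last occurrence, ready only)
def pvCompRec (r : String → Bool) : List String → List String
  | [] => []
  | x :: l => if !(l.contains x) && r x then x :: pvCompRec r l else pvCompRec r l

theorem pvCompRec_cons (r : String → Bool) (x : String) (l : List String) :
    pvCompRec r (x :: l) = if !(l.contains x) && r x then x :: pvCompRec r l else pvCompRec r l := rfl

theorem pvEnumerate_shift (l : List String) (s : Int) :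
    PySem.List.enumerate l (s + 1) = (PySem.List.enumerate l s).map (fun ip => (ip.1 + 1, ip.2)) := by
  induction l generalizing s with
  | nil => rfl
  | cons x l ih =>
    rw [PySem.List.enumerate_cons, PySem.List.enumerate_cons, List.map_cons, ih (s + 1)]

-- B's comprehension over enumerate/drop equals the recursive form
theorem pvComp_eq_rec (r : String → Bool) (l : List String) :
    ((PySem.List.enumerate l).filter (fun ip =>
        !((l.drop (ip.1.toNat + 1)).contains ip.2) && r ip.2)).map (·.2) = pvCompRec r l := by
  induction l with
  | nil => rfl
  | cons x l ih =>
    show ((PySem.List.enumerate (x :: l) 0).filter _).map _ = _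
    rw [PySem.List.enumerate_cons]
    have h01 : (0 : Int) + 1 = 1 := by norm_num
    rw [h01, (by norm_num : (1 : Int) = 0 + 1), pvEnumerate_shift l 0]
    rw [List.filter_cons, List.filter_map]
    have hcongr : ∀ ip ∈ PySem.List.enumerate l 0,
        ((fun (ip : Int × String) => !(((x :: l).drop (ip.1.toNat + 1)).contains ip.2) && r ip.2) ∘
          (fun ip => (ip.1 + 1, ip.2))) ip
        = (fun (ip : Int × String) => !((l.drop (ip.1.toNat + 1)).contains ip.2) && r ip.2) ip := by
      intro ip hip
      rw [PySem.List.mem_enumerate_iff] at hip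
      obtain ⟨k, hk, rfl⟩ := hip
      simp only [Function.comp]
      have h1 : ((0 : Int) + (k : Int) + 1).toNat + 1 = (((0 : Int) + (k : Int)).toNat + 1) + 1 := by omega
      rw [h1, List.drop_succ_cons]
    rw [List.filter_congr hcongr]
    by_cases hc : (!(l.contains x) && r x) = true
    · have : ((0 : Int).toNat + 1) = 1 := by norm_num
      simp only [this, List.drop_succ_cons, List.drop_zero] at *
      rw [if_pos hc, List.map_cons, List.map_map]
      have hmapeq : ((fun (ip : Int × String) => ip.2) ∘ (fun (ip : Int × String) => (ip.1 + 1, ip.2))) = (fun (ip : Int × String) => ip.2) := rfl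
      rw [hmapeq, ih, pvCompRec_cons, if_pos hc]
    · have : ((0 : Int).toNat + 1) = 1 := by norm_num
      simp only [this, List.drop_succ_cons, List.drop_zero] at *
      rw [if_neg hc, List.map_map]
      have hmapeq : ((fun (ip : Int × String) => ip.2) ∘ (fun (ip : Int × String) => (ip.1 + 1, ip.2))) = (fun (ip : Int × String) => ip.2) := rfl
      rw [hmapeq, ih, pvCompRec_cons, if_neg hc]

theorem pvCompRec_mem (r : String → Bool) (l : List String) (p : String)
    (h : p ∈ pvCompRec r l) : p ∈ l ∧ r p = true := by
  induction l with
  | nil => cases h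
  | cons x l ih =>
    rw [pvCompRec_cons] at h
    split at h
    · rename_i hc
      rcases List.mem_cons.mp h with rfl | h'
      · exact ⟨List.mem_cons_self .., (Bool.and_eq_true ..).mp hc |>.2⟩
      · obtain ⟨h1, h2⟩ := ih h'; exact ⟨List.mem_cons_of_mem _ h1, h2⟩
    · obtain ⟨h1, h2⟩ := ih h; exact ⟨List.mem_cons_of_mem _ h1, h2⟩

theorem pvCompRec_nodup (r : String → Bool) (l : List String) : (pvCompRec r l).Nodup := by
  induction l with
  | nil => exact List.nodup_nil
  | cons x l ih =>
    rw [pvCompRec_cons]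
    split
    · rename_i hc
      refine List.nodup_cons.mpr ⟨fun hmem => ?_, ih⟩
      have := (pvCompRec_mem r l x hmem).1
      have hx := ((Bool.and_eq_true ..).mp hc).1
      simp only [Bool.not_eq_eq_eq_not, Bool.not_true, List.contains_eq_mem,
        decide_eq_false_iff_not] at hx
      exact hx this
    · exact ih

theorem pvCountP_remove_one (l : List String) (p : String → Bool) (c : String)
    (hnd : l.Nodup) (hc : c ∈ l) (hpc : p c = true) :
    l.countP p = l.countP (fun d => p d && !(d == c)) + 1 := by
  induction l with
  | nil => cases hc
  | cons x l ih =>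
    by_cases hcx : c = x
    · have hnotin : x ∉ l := (List.nodup_cons.mp hnd).1
      have hpx : p x = true := by rw [← hcx]; exact hpc
      have hbx : (x == c) = true := by rw [hcx]; simp
      rw [List.countP_cons, List.countP_cons, hpx, hbx]
      simp only [Bool.not_true, Bool.and_false, if_true, Bool.false_eq_true, if_false]
      have heq : l.countP (fun d => p d && !(d == c)) = l.countP p := by
        apply List.countP_congr
        intro y hy
        have hyc : (y == c) = false := by
          apply beq_false_of_ne
          intro h
          exact hnotin (by rw [← hcx, ← h]; exact hy)
        rw [hyc]
        simp
      omega
    · have hc' : c ∈ l := by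
        rcases List.mem_cons.mp hc with h | h
        · exact absurd h hcx
        · exact h
      have hbx : (x == c) = false := beq_false_of_ne (fun h => hcx (h.symm))
      rw [List.countP_cons, List.countP_cons, hbx]
      simp only [Bool.not_false, Bool.and_true]
      rw [ih (List.nodup_cons.mp hnd).2 hc']
      omega

-- count bookkeeping: disjoint split bound
theorem pvCountP_split (l : List String) (pold pnew pf : String → Bool)
    (h1 : ∀ x ∈ l, pnew x = true → pold x = true)
    (h2 : ∀ x ∈ l, pf x = true → pold x = true ∧ pnew x = false) :
    l.countP pnew + l.countP pf ≤ l.countP pold := by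
  induction l with
  | nil => simp
  | cons x l ih =>
    have ihl := ih (fun y hy => h1 y (List.mem_cons_of_mem _ hy))
      (fun y hy => h2 y (List.mem_cons_of_mem _ hy))
    rw [List.countP_cons, List.countP_cons, List.countP_cons]
    have hx1 := h1 x (List.mem_cons_self ..)
    have hx2 := h2 x (List.mem_cons_self ..)
    have e1 : (if pnew x = true then 1 else 0) + (if pf x = true then 1 else 0)
        ≤ (if pold x = true then 1 else 0) := by
      by_cases hn : pnew x = true
      · have hold := hx1 hn
        by_cases hf : pf x = true
        · exact absurd (hx2 hf).2 (by simp [hn])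
        · simp [hn, hf, hold]
      · by_cases hf : pf x = true
        · simp [hn, hf, (hx2 hf).1]
        · by_cases ho : pold x = true <;> simp [hn, hf, ho]
    omega

-- counting members of a nodup sublist-as-set
theorem pvCountP_mem (l F : List String) (hl : l.Nodup) (hF : F.Nodup)
    (hsub : ∀ x ∈ F, x ∈ l) : l.countP (fun p => F.contains p) = F.length := by
  rw [List.countP_eq_length_filter]
  have hperm : (l.filter (fun p => F.contains p)).Perm F := by
    apply (List.perm_ext_iff_of_nodup (hl.filter _) hF).mpr
    intro y
    simp only [List.mem_filter, List.contains_eq_mem, decide_eq_true_eq]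
    exact ⟨fun h => h.2, fun h => ⟨hsub y h, h⟩⟩
  exact hperm.length_eq

theorem pvProcF_cons_none (T : PySem.Dict String String) (c : String) (F : List String)
    (st : PySem.Dict String Int × PySem.Dict String Int × PySem.Dict (String × String) Int)
    (h : T.get? c = none) : pvProcF T (c :: F) st = pvProcF T F st := by
  conv_lhs => unfold pvProcF; rw [h]

theorem pvProcF_cons_some (T : PySem.Dict String String) (c sink : String) (F : List String)
    (st : PySem.Dict String Int × PySem.Dict String Int × PySem.Dict (String × String) Int)
    (h : T.get? c = some sink) :
    pvProcF T (c :: F) st =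
      ((pvProcF T F (st.1.modify sink 0 (· - 1),
          (st.2.1.modify sink 0 (· + st.2.1.getD c 0)).insert c 0,
          st.2.2.insert (c, sink) (-(st.2.1.getD c 0)))).1,
        (if (st.1.modify sink 0 (· - 1)).getD sink 0 = 0 then [sink] else []) ++
          (pvProcF T F (st.1.modify sink 0 (· - 1),
            (st.2.1.modify sink 0 (· + st.2.1.getD c 0)).insert c 0,
            st.2.2.insert (c, sink) (-(st.2.1.getD c 0)))).2) := by
  conv_lhs => unfold pvProcF; rw [h]

theorem pvGet?_of_contains (T : PySem.Dict String String) (c : String)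
    (h : T.contains c = true) : T.get? c = some (T.getD c "") := by
  rw [PySem.Dict.contains_eq_isSome_get?] at h
  cases hg : T.get? c with
  | none => rw [hg] at h; cases h
  | some v => rw [PySem.Dict.getD_eq_get?_getD, hg]; rfl

theorem pvSinks_mem (T : PySem.Dict String String) (F : List String) (p : String) :
    p ∈ (F.filter (fun c => T.contains c)).map (fun c => T.getD c "") ↔
      ∃ c ∈ F, T.get? c = some p := by
  simp only [List.mem_map, List.mem_filter]
  constructor
  · rintro ⟨c, ⟨hcF, hcc⟩, rfl⟩
    exact ⟨c, hcF, pvGet?_of_contains T c hcc⟩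
  · rintro ⟨c, hcF, hg⟩
    have hcc : T.contains c = true := by
      rw [PySem.Dict.contains_eq_isSome_get?, hg]; rfl
    refine ⟨c, ⟨hcF, hcc⟩, ?_⟩
    rw [PySem.Dict.getD_eq_get?_getD, hg]
    rfl

-- one whole frontier of A: appends = B's comprehension, amounts/result = B's fold,
-- and the counters end up consistent with done ∪ frontier
theorem pvRound (T : PySem.Dict String String) (hT : T.keys.Nodup) (D : List String) :
    ∀ (F S : List String) (deg am : PySem.Dict String Int)
      (res : PySem.Dict (String × String) Int),
      F.Nodup → (∀ x ∈ F, x ∉ S) →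
      (∀ x, x ∈ D ↔ (x ∈ S ∨ x ∈ F)) →
      (∀ p, deg.getD p 0 = ((pvChl T p).countP (fun c => !S.contains c) : Int)) →
      (pvProcF T F (deg, am, res)).2
        = pvCompRec (fun p => (pvChl T p).all (fun d => D.contains d))
            ((F.filter (fun c => T.contains c)).map (fun c => T.getD c ""))
      ∧ (pvProcF T F (deg, am, res)).1.2
        = (F.filter (fun c => T.contains c)).foldl
            (fun (st : PySem.Dict String Int × PySem.Dict (String × String) Int) c =>
              let sink := T.getD c ""
              let av := st.1.getD c 0
              ((st.1.modify sink 0 (· + av)).insert c 0, st.2.insert (c, sink) (-av))) (am, res)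
      ∧ ∀ p, (pvProcF T F (deg, am, res)).1.1.getD p 0
          = ((pvChl T p).countP (fun c => !(S.contains c || F.contains c)) : Int) := by
  intro F
  induction F with
  | nil =>
    intro S deg am res _ _ _ h5
    refine ⟨rfl, rfl, fun p => ?_⟩
    show deg.getD p 0 = _
    rw [h5 p]
    congr 1
    apply List.countP_congr
    intro d _
    simp
  | cons c F0 ih =>
    intro S deg am res hnd hdisj hD h5
    have hcF0 : c ∉ F0 := (List.nodup_cons.mp hnd).1
    have hnd0 : F0.Nodup := (List.nodup_cons.mp hnd).2
    have hcS : c ∉ S := hdisj c (List.mem_cons_self ..)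
    cases hg : T.get? c with
    | none =>
      -- continue: c is not a key, it is skipped; no child list contains c
      have hnotchl : ∀ p, c ∉ pvChl T p := by
        intro p hmem
        rw [pvChl_mem T hT] at hmem
        rw [hg] at hmem; cases hmem
      have hdisj' : ∀ x ∈ F0, x ∉ (c :: S) := by
        intro x hx
        rw [List.mem_cons]
        rintro (rfl | hxS)
        · exact hcF0 hx
        · exact hdisj x (List.mem_cons_of_mem _ hx) hxS
      have hD' : ∀ x, x ∈ D ↔ (x ∈ (c :: S) ∨ x ∈ F0) := by
        intro x
        rw [hD x, List.mem_cons, List.mem_cons]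
        tauto
      have h5' : ∀ p, deg.getD p 0 = ((pvChl T p).countP (fun d => !(c :: S).contains d) : Int) := by
        intro p
        rw [h5 p]
        congr 1
        apply List.countP_congr
        intro d hd
        by_cases hdc2 : d = c
        · exact absurd (hdc2 ▸ hd) (hnotchl p)
        · simp [List.contains_cons, beq_iff_eq, hdc2]
      obtain ⟨ih1, ih2, ih3⟩ := ih (c :: S) deg am res hnd0 hdisj' hD' h5'
      have hcc : T.contains c = false := by
        rw [PySem.Dict.contains_eq_isSome_get?, hg]; rfl
      rw [pvProcF_cons_none T c F0 _ hg]
      refine ⟨?_, ?_, ?_⟩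
      · rw [ih1, List.filter_cons_of_neg (by simp [hcc])]
      · rw [ih2, List.filter_cons_of_neg (by simp [hcc])]
      · intro p
        rw [ih3 p]
        congr 1
        apply List.countP_congr
        intro d hd
        by_cases hdc2 : d = c
        · exact absurd (hdc2 ▸ hd) (hnotchl p)
        · simp [List.contains_cons, beq_iff_eq, hdc2]
    | some sink =>
      have hcchl : c ∈ pvChl T sink := (pvChl_mem T hT c sink).mpr hg
      have hcc : T.contains c = true := by
        rw [PySem.Dict.contains_eq_isSome_get?, hg]; rfl
      have hgd : T.getD c "" = sink := by
        rw [PySem.Dict.getD_eq_get?_getD, hg]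
        rfl
      -- the new counter state
      have hdeg'self : (deg.modify sink 0 (· - 1)).getD sink 0
          = ((pvChl T sink).countP (fun d => !(c :: S).contains d) : Int) := by
        rw [PySem.Dict.getD_modify, if_pos rfl, h5 sink]
        have hrm := pvCountP_remove_one (pvChl T sink) (fun d => !S.contains d) c
          (pvChl_nodup T hT sink) hcchl
          (by simp [List.contains_eq_mem, hcS])
        rw [hrm]
        have : (pvChl T sink).countP (fun d => (!S.contains d) && !(d == c))
            = (pvChl T sink).countP (fun d => !(c :: S).contains d) := by
          apply List.countP_congr
          intro d _
          by_cases hdc : d = c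
          · simp [hdc, List.contains_cons]
          · simp [List.contains_cons, beq_iff_eq, hdc]
        rw [this]
        push_cast
        ring
      have h5' : ∀ p, (deg.modify sink 0 (· - 1)).getD p 0
          = ((pvChl T p).countP (fun d => !(c :: S).contains d) : Int) := by
        intro p
        by_cases hps : p = sink
        · subst hps; exact hdeg'self
        · rw [PySem.Dict.getD_modify, if_neg hps, h5 p]
          congr 1
          apply List.countP_congr
          intro d hd
          have hne : d ≠ c := by
            rintro rfl
            rw [pvChl_mem T hT] at hd
            rw [hg] at hd
            exact hps (Option.some.inj hd).symm
          simp [List.contains_cons, beq_iff_eq, hne]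
      have hdisj' : ∀ x ∈ F0, x ∉ (c :: S) := by
        intro x hx
        rw [List.mem_cons]
        rintro (rfl | hxS)
        · exact hcF0 hx
        · exact hdisj x (List.mem_cons_of_mem _ hx) hxS
      have hD' : ∀ x, x ∈ D ↔ (x ∈ (c :: S) ∨ x ∈ F0) := by
        intro x
        rw [hD x, List.mem_cons, List.mem_cons]
        tauto
      obtain ⟨ih1, ih2, ih3⟩ := ih (c :: S) (deg.modify sink 0 (· - 1))
        ((am.modify sink 0 (· + am.getD c 0)).insert c 0)
        (res.insert (c, sink) (-(am.getD c 0))) hnd0 hdisj' hD' h5'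
      -- the append condition agrees with B's keep-last + readiness test
      have hiff : ((deg.modify sink 0 (· - 1)).getD sink 0 = 0) ↔
          ((!((F0.filter (fun c => T.contains c)).map (fun c => T.getD c "")).contains sink)
            && (pvChl T sink).all (fun d => D.contains d)) = true := by
        rw [hdeg'self, Int.natCast_eq_zero, List.countP_eq_zero]
        simp only [Bool.not_eq_true', Bool.not_eq_false, Bool.and_eq_true,
          List.contains_eq_mem, decide_eq_true_eq, decide_eq_false_iff_not, not_not,
          List.all_eq_true, List.mem_cons]
        constructor
        · intro h
          refine ⟨?_, ?_⟩
          · intro hmem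
            rw [pvSinks_mem T F0 sink] at hmem
            obtain ⟨c', hc'F0, hgc'⟩ := hmem
            have hc'chl : c' ∈ pvChl T sink := (pvChl_mem T hT c' sink).mpr hgc'
            rcases h c' hc'chl with rfl | hS
            · exact hcF0 hc'F0
            · exact hdisj c' (List.mem_cons_of_mem _ hc'F0) hS
          · intro d hd
            rw [hD d]
            rcases h d hd with rfl | hS
            · exact Or.inr (List.mem_cons_self ..)
            · exact Or.inl hS
        · rintro ⟨hnotin, hready⟩ d hd
          have hdD := hready d hd
          rw [hD d] at hdD
          rcases hdD with hdS | hdcF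
          · exact Or.inr hdS
          · rcases List.mem_cons.mp hdcF with rfl | hdF0
            · exact Or.inl rfl
            · exfalso
              apply hnotin
              rw [pvSinks_mem T F0 sink]
              rw [pvChl_mem T hT] at hd
              exact ⟨d, hdF0, hd⟩
      rw [pvProcF_cons_some T c sink F0 _ hg]
      refine ⟨?_, ?_, ?_⟩
      · simp only
        rw [ih1, List.filter_cons_of_pos (by simp [hcc]), List.map_cons, hgd,
          pvCompRec_cons]
        by_cases h0 : (deg.modify sink 0 (· - 1)).getD sink 0 = 0
        · rw [if_pos h0, if_pos (hiff.mp h0)]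
          rfl
        · rw [if_neg h0, if_neg (fun hc => h0 (hiff.mpr hc))]
          rfl
      · simp only
        rw [ih2, List.filter_cons_of_pos (by simp [hcc]), List.foldl_cons, hgd]
      · intro p
        simp only
        rw [ih3 p]
        congr 1
        apply List.countP_congr
        intro d _
        simp only [List.contains_cons]
        by_cases hdc : (d == c) = true <;> by_cases hdS : S.contains d = true <;>
          by_cases hdF : F0.contains d = true <;> simp [hdc, hdS, hdF]

theorem pvLoopA_nil (T : PySem.Dict String String) (f : Nat) (deg am : PySem.Dict String Int)
    (res : PySem.Dict (String × String) Int) : pvLoopA T f [] deg am res = res := by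
  cases f <;> rfl

theorem pvLoopA_cons_none (T : PySem.Dict String String) (f : Nat) (c : String) (q : List String)
    (deg am : PySem.Dict String Int) (res : PySem.Dict (String × String) Int)
    (h : T.get? c = none) :
    pvLoopA T (f + 1) (c :: q) deg am res = pvLoopA T f q deg am res := by
  conv_lhs => unfold pvLoopA; rw [h]

theorem pvLoopA_cons_some (T : PySem.Dict String String) (f : Nat) (c sink : String)
    (q : List String) (deg am : PySem.Dict String Int) (res : PySem.Dict (String × String) Int)
    (h : T.get? c = some sink) :
    pvLoopA T (f + 1) (c :: q) deg am res =
      pvLoopA T f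
        (if (deg.modify sink 0 (· - 1)).getD sink 0 = 0 then q ++ [sink] else q)
        (deg.modify sink 0 (· - 1))
        ((am.modify sink 0 (· + am.getD c 0)).insert c 0)
        (res.insert (c, sink) (-(am.getD c 0))) := by
  conv_lhs => unfold pvLoopA; rw [h]

theorem pvLoopB_cons (T : PySem.Dict String String) (C : PySem.Dict String (List String))
    (fuel : Nat) (c : String) (fr : List String) (don : PySem.Set String)
    (am : PySem.Dict String Int) (res : PySem.Dict (String × String) Int) :
    pvLoopB T C (fuel + 1) (c :: fr) don am res =
      pvLoopB T C fuel
        (((PySem.List.enumerate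
            (((c :: fr).filter (fun c => T.contains c)).map (fun c => T.getD c ""))).filter
          (fun ip =>
            !(((((c :: fr).filter (fun c => T.contains c)).map (fun c => T.getD c "")).drop
                (ip.1.toNat + 1)).contains ip.2) &&
            (C.getD ip.2 []).all (fun d => (PySem.Set.update don (c :: fr)).contains d))).map (·.2))
        (PySem.Set.update don (c :: fr))
        (((c :: fr).filter (fun c => T.contains c)).foldl
          (fun (st : PySem.Dict String Int × PySem.Dict (String × String) Int) c =>
            let sink := T.getD c ""
            let av := st.1.getD c 0
            ((st.1.modify sink 0 (· + av)).insert c 0, st.2.insert (c, sink) (-av))) (am, res)).1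
        (((c :: fr).filter (fun c => T.contains c)).foldl
          (fun (st : PySem.Dict String Int × PySem.Dict (String × String) Int) c =>
            let sink := T.getD c ""
            let av := st.1.getD c 0
            ((st.1.modify sink 0 (· + av)).insert c 0, st.2.insert (c, sink) (-av))) (am, res)).2 := by
  conv_lhs => unfold pvLoopB

-- absorbing a whole frontier into A's queue recursion
theorem pvLoopA_level (T : PySem.Dict String String) :
    ∀ (F N : List String) (f : Nat) (deg am : PySem.Dict String Int)
      (res : PySem.Dict (String × String) Int),
      pvLoopA T (F.length + f) (F ++ N) deg am res =
        pvLoopA T f (N ++ (pvProcF T F (deg, am, res)).2)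
          (pvProcF T F (deg, am, res)).1.1 (pvProcF T F (deg, am, res)).1.2.1
          (pvProcF T F (deg, am, res)).1.2.2 := by
  intro F
  induction F with
  | nil =>
    intro N f deg am res
    simp [pvProcF]
  | cons c F0 ih =>
    intro N f deg am res
    have hlen : (c :: F0).length + f = (F0.length + f) + 1 := by
      simp only [List.length_cons]; omega
    rw [hlen, List.cons_append]
    cases hg : T.get? c with
    | none =>
      rw [pvLoopA_cons_none T (F0.length + f) c (F0 ++ N) deg am res hg,
        pvProcF_cons_none T c F0 _ hg]
      exact ih N f deg am res
    | some sink =>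
      rw [pvLoopA_cons_some T (F0.length + f) c sink (F0 ++ N) deg am res hg,
        pvProcF_cons_some T c sink F0 _ hg]
      by_cases h0 : (deg.modify sink 0 (· - 1)).getD sink 0 = 0
      · rw [if_pos h0, if_pos h0, List.append_assoc]
        rw [ih (N ++ [sink]) f]
        simp only [List.append_assoc, List.singleton_append]
      · rw [if_neg h0, if_neg h0]
        rw [ih N f]
        simp only [List.nil_append]

theorem pvLoopA_level0 (T : PySem.Dict String String) (F : List String) (f : Nat)
    (deg am : PySem.Dict String Int) (res : PySem.Dict (String × String) Int) :
    pvLoopA T (F.length + f) F deg am res =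
      pvLoopA T f (pvProcF T F (deg, am, res)).2
        (pvProcF T F (deg, am, res)).1.1 (pvProcF T F (deg, am, res)).1.2.1
        (pvProcF T F (deg, am, res)).1.2.2 := by
  have h := pvLoopA_level T F [] f deg am res
  rw [List.append_nil] at h
  rw [h, List.nil_append]

theorem pvSim_main (T : PySem.Dict String String) (hT : T.keys.Nodup) :
    ∀ (fB fA : Nat) (F : List String) (S : List String)
      (deg am : PySem.Dict String Int) (res : PySem.Dict (String × String) Int),
      F.Nodup → (∀ x ∈ F, x ∉ S) →
      (∀ p ∈ F, ∀ c ∈ pvChl T p, c ∈ S) →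
      (∀ p ∈ S, ∀ c ∈ pvChl T p, c ∈ S) →
      (∀ p, deg.getD p 0 = ((pvChl T p).countP (fun c => !S.contains c) : Int)) →
      F.length + (pvChildren T).keys.countP (fun p => !(S.contains p || F.contains p)) ≤ fA →
      F.length + (pvChildren T).keys.countP (fun p => !(S.contains p || F.contains p)) ≤ fB →
      pvLoopA T fA F deg am res = pvLoopB T (pvChildren T) fB F S am res := by
  intro fB
  induction fB with
  | zero =>
    intro fA F S deg am res hnd hdisj h3 h4 h5 hA hB
    have hF : F = [] := by
      have : F.length = 0 := by omega
      exact List.length_eq_zero_iff.mp this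
    subst hF
    rw [pvLoopA_nil]
    rfl
  | succ fB ih =>
    intro fA F S deg am res hnd hdisj h3 h4 h5 hA hB
    cases F with
    | nil =>
      rw [pvLoopA_nil]
      rfl
    | cons c F0 =>
      have hkeysnd : (pvChildren T).keys.Nodup := by
        rw [pvChildren_keys]
        exact PySem.Set.nodup_ofList _
      -- one B round
      rw [pvLoopB_cons, pvComp_eq_rec
        (fun p => ((pvChildren T).getD p []).all
          (fun d => (PySem.Set.update S (c :: F0)).contains d))
        (((c :: F0).filter (fun c => T.contains c)).map (fun c => T.getD c ""))]
      -- absorb the frontier on the A side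
      have hlenA : (c :: F0).length ≤ fA := le_trans (Nat.le_add_right _ _) hA
      have hfa : (c :: F0).length + (fA - (c :: F0).length) = fA := by omega
      rw [← hfa, pvLoopA_level0]
      -- the round correspondence
      have hD : ∀ x, x ∈ (PySem.Set.update S (c :: F0) : List String) ↔ (x ∈ S ∨ x ∈ (c :: F0)) :=
        fun x => PySem.Set.mem_update S (c :: F0) x
      obtain ⟨ih1, ih2, ih3⟩ := pvRound T hT (PySem.Set.update S (c :: F0)) (c :: F0) S
        deg am res hnd hdisj hD h5
      have ih21 : (pvProcF T (c :: F0) (deg, am, res)).1.2.1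
          = (((c :: F0).filter (fun c => T.contains c)).foldl
              (fun (st : PySem.Dict String Int × PySem.Dict (String × String) Int) c =>
                let sink := T.getD c ""
                let av := st.1.getD c 0
                ((st.1.modify sink 0 (· + av)).insert c 0, st.2.insert (c, sink) (-av)))
              (am, res)).1 := by rw [ih2]
      have ih22 : (pvProcF T (c :: F0) (deg, am, res)).1.2.2
          = (((c :: F0).filter (fun c => T.contains c)).foldl
              (fun (st : PySem.Dict String Int × PySem.Dict (String × String) Int) c =>
                let sink := T.getD c ""
                let av := st.1.getD c 0
                ((st.1.modify sink 0 (· + av)).insert c 0, st.2.insert (c, sink) (-av)))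
              (am, res)).2 := by rw [ih2]
      rw [ih1, ih21, ih22]
      -- names for the next round's data
      set S' : List String := PySem.Set.update S (c :: F0) with hS'
      set F' : List String := pvCompRec
        (fun p => (pvChl T p).all (fun d => S'.contains d))
        (((c :: F0).filter (fun c => T.contains c)).map (fun c => T.getD c "")) with hF'
      -- facts about the new frontier
      have hmemF' : ∀ p ∈ F', (∃ c' ∈ (c :: F0), T.get? c' = some p)
          ∧ (∀ d ∈ pvChl T p, d ∈ S') := by
        intro p hp
        obtain ⟨hsink, hready⟩ := pvCompRec_mem _ _ _ hp
        refine ⟨(pvSinks_mem T (c :: F0) p).mp hsink, ?_⟩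
        intro d hd
        have := (List.all_eq_true.mp hready) d hd
        simpa [List.contains_eq_mem] using this
      have hdisj' : ∀ x ∈ F', x ∉ S' := by
        intro x hx hxS'
        obtain ⟨⟨c', hc'F, hgc'⟩, _⟩ := hmemF' x hx
        have hc'chl : c' ∈ pvChl T x := (pvChl_mem T hT c' x).mpr hgc'
        have hchlS : ∀ d ∈ pvChl T x, d ∈ S := by
          rcases (hD x).mp hxS' with hxS | hxF
          · exact h4 x hxS
          · exact h3 x hxF
        exact hdisj c' hc'F (hchlS c' hc'chl)
      have h3' : ∀ p ∈ F', ∀ d ∈ pvChl T p, d ∈ S' := fun p hp => (hmemF' p hp).2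
      have h4' : ∀ p ∈ S', ∀ d ∈ pvChl T p, d ∈ S' := by
        intro p hp d hd
        have : d ∈ S := by
          rcases (hD p).mp hp with hpS | hpF
          · exact h4 p hpS d hd
          · exact h3 p hpF d hd
        exact (hD d).mpr (Or.inl this)
      have h5' : ∀ p, (pvProcF T (c :: F0) (deg, am, res)).1.1.getD p 0
          = ((pvChl T p).countP (fun d => !S'.contains d) : Int) := by
        intro p
        rw [ih3 p]
        congr 1
        apply List.countP_congr
        intro d _
        have hb : S'.contains d = (S.contains d || (c :: F0).contains d) := by
          rw [Bool.eq_iff_iff]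
          simp [List.contains_eq_mem, hD d]
        rw [hb]
      have hF'nd : F'.Nodup := pvCompRec_nodup _ _
      have hF'P : ∀ x ∈ F', x ∈ (pvChildren T).keys := by
        intro x hx
        obtain ⟨⟨c', _, hgc'⟩, _⟩ := hmemF' x hx
        rw [pvChildren_keys, PySem.Set.mem_ofList]
        have := PySem.Dict.mem_items_of_get?_eq_some T hgc'
        exact List.mem_map_of_mem this
      -- the potential decreases by at least the frontier length
      have hcount : F'.length +
          (pvChildren T).keys.countP (fun p => !(S'.contains p || F'.contains p))
          ≤ (pvChildren T).keys.countP (fun p => !(S.contains p || (c :: F0).contains p)) := by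
        have hsplit := pvCountP_split (pvChildren T).keys
          (fun p => !(S.contains p || (c :: F0).contains p))
          (fun p => !(S'.contains p || F'.contains p))
          (fun p => F'.contains p)
          (by
            intro x _ hx
            simp only [Bool.not_eq_true', Bool.or_eq_false_iff, List.contains_eq_mem,
              decide_eq_false_iff_not] at hx ⊢
            constructor
            · intro hxS; exact hx.1 ((hD x).mpr (Or.inl hxS))
            · intro hxF; exact hx.1 ((hD x).mpr (Or.inr hxF)))
          (by
            intro x _ hx
            have hxF' : x ∈ F' := by simpa [List.contains_eq_mem] using hx
            have hxnS' : x ∉ S' := hdisj' x hxF'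
            constructor
            · simp only [Bool.not_eq_true', Bool.or_eq_false_iff, List.contains_eq_mem,
                decide_eq_false_iff_not]
              constructor
              · intro hxS; exact hxnS' ((hD x).mpr (Or.inl hxS))
              · intro hxF; exact hxnS' ((hD x).mpr (Or.inr hxF))
            · simp [List.contains_eq_mem, hxF'])
        have hlen : (pvChildren T).keys.countP (fun p => F'.contains p) = F'.length :=
          pvCountP_mem _ _ hkeysnd hF'nd hF'P
        omega
      -- recurse
      exact ih (fA - (c :: F0).length) F' S'
        (pvProcF T (c :: F0) (deg, am, res)).1.1
        (((c :: F0).filter (fun c => T.contains c)).foldl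
          (fun (st : PySem.Dict String Int × PySem.Dict (String × String) Int) c =>
            let sink := T.getD c ""
            let av := st.1.getD c 0
            ((st.1.modify sink 0 (· + av)).insert c 0, st.2.insert (c, sink) (-av)))
          (am, res)).1
        (((c :: F0).filter (fun c => T.contains c)).foldl
          (fun (st : PySem.Dict String Int × PySem.Dict (String × String) Int) c =>
            let sink := T.getD c ""
            let av := st.1.getD c 0
            ((st.1.modify sink 0 (· + av)).insert c 0, st.2.insert (c, sink) (-av)))
          (am, res)).2
        hF'nd hdisj' h3' h4' h5'
        (by
          have : (c :: F0).length + (pvChildren T).keys.countP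
              (fun p => !(S.contains p || (c :: F0).contains p)) ≤ fA := hA
          omega)
        (by
          have h1 : 1 ≤ (c :: F0).length := by simp [List.length_cons]
          omega)

-- ===== VERDICT (by name: the statement is the Claim_ definition above) =====
-- initial-state facts and the final assembly
theorem pvLeaves_eq (tree : List (String × String)) :
    (PySem.Dict.ofList tree).keys.filter
        (fun k => !(pvSumBy ((PySem.Dict.ofList tree).values.map (fun p => (p, (1 : Int))))).contains k)
      = (PySem.Dict.ofList tree).keys.filter
        (fun c => !(pvChildren (PySem.Dict.ofList tree)).contains c) := by
  apply List.filter_congr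
  intro k _
  rw [pvDegree_eq, PySem.Dict.contains_counter]
  have hb : (PySem.Dict.ofList tree).values.contains k
      = (pvChildren (PySem.Dict.ofList tree)).contains k := by
    rw [Bool.eq_iff_iff]
    constructor
    · intro h
      rw [PySem.Dict.contains_iff_mem_keys, pvChildren_keys, PySem.Set.mem_ofList]
      simpa [List.contains_eq_mem] using h
    · intro h
      rw [PySem.Dict.contains_iff_mem_keys, pvChildren_keys, PySem.Set.mem_ofList] at h
      simpa [List.contains_eq_mem] using h
  rw [hb]

theorem pvKeys_len_le (tree : List (String × String)) :
    (PySem.Dict.ofList tree).keys.length ≤ tree.length := by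
  have hk : (PySem.Dict.ofList tree).keys = PySem.Set.ofList (tree.map (·.1)) := by
    have h := PySem.Dict.keys_foldl_insert_key (l := tree) (key := fun p => p.1)
      (f := fun _ p => p.2) (d := (PySem.Dict.empty : PySem.Dict String String))
    simpa [PySem.Dict.keys_empty] using h
  rw [hk]
  calc (PySem.Set.ofList (tree.map (·.1))).length ≤ (tree.map (·.1)).length :=
        PySem.Set.length_ofList_le _
    _ = tree.length := List.length_map ..

theorem pvPotential_le (tree : List (String × String)) :
    ((PySem.Dict.ofList tree).keys.filter
        (fun c => !(pvChildren (PySem.Dict.ofList tree)).contains c)).length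
      + (pvChildren (PySem.Dict.ofList tree)).keys.countP
        (fun p => !(([] : List String).contains p ||
          ((PySem.Dict.ofList tree).keys.filter
            (fun c => !(pvChildren (PySem.Dict.ofList tree)).contains c)).contains p))
      ≤ 2 * tree.length := by
  have hA : ((PySem.Dict.ofList tree).keys.filter
      (fun c => !(pvChildren (PySem.Dict.ofList tree)).contains c)).length ≤ tree.length :=
    le_trans (List.length_filter_le _ _) (pvKeys_len_le tree)
  have hB : (pvChildren (PySem.Dict.ofList tree)).keys.countP
      (fun p => !(([] : List String).contains p ||
        ((PySem.Dict.ofList tree).keys.filter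
          (fun c => !(pvChildren (PySem.Dict.ofList tree)).contains c)).contains p))
      ≤ tree.length := by
    calc _ ≤ (pvChildren (PySem.Dict.ofList tree)).keys.length := List.countP_le_length ..
      _ ≤ (PySem.Dict.ofList tree).values.length := by
          rw [pvChildren_keys]; exact PySem.Set.length_ofList_le _
      _ = (PySem.Dict.ofList tree).keys.length := by
          simp [PySem.Dict.values, PySem.Dict.keys]
      _ ≤ tree.length := pvKeys_len_le tree
  omega

theorem double_entrify_by_spec : Claim_equal_double_entrify_by := by
  intro amounts tree _ _
  show List.map (fun x => (x.1.1, x.1.2, x.2))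
      (pvLoopA (PySem.Dict.ofList tree) (2 * tree.length + 1)
        (List.filter (fun k => !(pvSumBy (List.map (fun p => (p, (1 : Int)))
            (PySem.Dict.ofList tree).values)).contains k) (PySem.Dict.ofList tree).keys)
        (pvSumBy (List.map (fun p => (p, (1 : Int))) (PySem.Dict.ofList tree).values))
        (PySem.Dict.ofList amounts) PySem.Dict.empty).items
    = List.map (fun x => (x.1.1, x.1.2, x.2))
      (pvLoopB (PySem.Dict.ofList tree) (pvChildren (PySem.Dict.ofList tree))
        (2 * tree.length + 1)
        (List.filter (fun c => !(pvChildren (PySem.Dict.ofList tree)).contains c)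
          (PySem.Dict.ofList tree).keys)
        PySem.Set.empty (PySem.Dict.ofList amounts) PySem.Dict.empty).items
  rw [pvLeaves_eq tree]
  have hT : (PySem.Dict.ofList tree).keys.Nodup := PySem.Dict.nodup_keys_ofList tree
  have hnd : ((PySem.Dict.ofList tree).keys.filter
      (fun c => !(pvChildren (PySem.Dict.ofList tree)).contains c)).Nodup := hT.filter _
  have hdisj : ∀ x ∈ (PySem.Dict.ofList tree).keys.filter
      (fun c => !(pvChildren (PySem.Dict.ofList tree)).contains c), x ∉ ([] : List String) :=
    fun x _ hx => absurd hx (List.not_mem_nil)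
  have h3 : ∀ p ∈ (PySem.Dict.ofList tree).keys.filter
      (fun c => !(pvChildren (PySem.Dict.ofList tree)).contains c),
      ∀ c ∈ pvChl (PySem.Dict.ofList tree) p, c ∈ ([] : List String) := by
    intro p hp c hc
    rw [List.mem_filter] at hp
    have hpc : (pvChildren (PySem.Dict.ofList tree)).contains p = false := by
      have h2 := hp.2
      rcases Bool.eq_false_or_eq_true ((pvChildren (PySem.Dict.ofList tree)).contains p) with h | h
      · rw [h] at h2; simp at h2
      · exact h
    have hnil : pvChl (PySem.Dict.ofList tree) p = [] :=
      PySem.Dict.getD_of_not_contains _ _ hpc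
    rw [hnil] at hc
    cases hc
  have h4 : ∀ p ∈ ([] : List String), ∀ c ∈ pvChl (PySem.Dict.ofList tree) p,
      c ∈ ([] : List String) := fun x hx => absurd hx (List.not_mem_nil)
  have h5 : ∀ p, (pvSumBy ((PySem.Dict.ofList tree).values.map (fun p => (p, (1 : Int))))).getD p 0
      = ((pvChl (PySem.Dict.ofList tree) p).countP
          (fun c => !([] : List String).contains c) : Int) := by
    intro p
    rw [pvDegree_eq, PySem.Dict.getD_counter]
    have h1 : (pvChl (PySem.Dict.ofList tree) p).countP
        (fun c => !([] : List String).contains c) = (pvChl (PySem.Dict.ofList tree) p).length := by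
      have h2 := List.countP_congr (l := pvChl (PySem.Dict.ofList tree) p)
        (p := fun c => !([] : List String).contains c) (q := fun _ => true) (by intro x _; simp)
      rw [h2, List.countP_true]
    rw [h1, pvChl_length]
  have hpot := pvPotential_le tree
  have hA : ((PySem.Dict.ofList tree).keys.filter
        (fun c => !(pvChildren (PySem.Dict.ofList tree)).contains c)).length
      + (pvChildren (PySem.Dict.ofList tree)).keys.countP
        (fun p => !(([] : List String).contains p ||
          ((PySem.Dict.ofList tree).keys.filter
            (fun c => !(pvChildren (PySem.Dict.ofList tree)).contains c)).contains p))
      ≤ 2 * tree.length + 1 := by omega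
  have hmain := pvSim_main (PySem.Dict.ofList tree) hT
    (2 * tree.length + 1) (2 * tree.length + 1)
    ((PySem.Dict.ofList tree).keys.filter
      (fun c => !(pvChildren (PySem.Dict.ofList tree)).contains c))
    []
    (pvSumBy ((PySem.Dict.ofList tree).values.map (fun p => (p, (1 : Int)))))
    (PySem.Dict.ofList amounts) PySem.Dict.empty
    hnd hdisj h3 h4 h5 hA hA
  rw [hmain]
  rfl
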